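-- pv_equiv track=rewrite | github.com/chrismmorin-ux/Perspective-Cosmology | verification/sympy/cnh_deep_investigation.py | ideal_count
-- ===== SOURCE A (Python) =====
-- def ideal_count(n):
--     """Number of ideals in Z[i] with norm n.
--     a(n) = sum_{d|n} chi_4(d) where chi_4 is the non-principal character mod 4.
--     For n=0: return 1 (the zero ideal). For n<0: return 0."""
--     if n < 0:
--         return 0
--     if n == 0:
--         return 1  # Convention: zero ideal has norm 0
--     # chi_4(d): 0 if d even, 1 if d=1 mod 4, -1 if d=3 mod 4
--     total = 0
--     for d in range(1, n + 1):
--         if n % d == 0: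
--             if d % 2 == 0:
--                 total += 0
--             elif d % 4 == 1:
--                 total += 1
--             else:  # d % 4 == 3
--                 total -= 1
--     return total
-- ===== SOURCE B (Python) =====
-- def ideal_count(n):
--     """Number of ideals in Z[i] with norm n: sum of chi_4 over the divisors of n.
--     Enumerates divisor pairs (d, n//d) up to sqrt(n) instead of scanning 1..n."""
--     if n < 0:
--         return 0
--     if n == 0:
--         return 1
--     total = 0
--     d = 1
--     while d * d <= n:
--         if n % d == 0:
--             total += _chi4(d)
--             q = n // d
--             if q != d:
--                 total += _chi4(q)
--         d += 1
--     return total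
--
--
-- def _chi4(d):
--     if d % 2 == 0:
--         return 0
--     return 1 if d % 4 == 1 else -1
-- ===== Notes on version B (the rewrite author's own statement) =====
-- stated objective: faster
-- what changed: Instead of scanning every d in 1..n and testing divisibility, B walks d only up to sqrt(n) and adds chi_4 for both members d and n//d of each divisor pair.
import Mathlib
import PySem

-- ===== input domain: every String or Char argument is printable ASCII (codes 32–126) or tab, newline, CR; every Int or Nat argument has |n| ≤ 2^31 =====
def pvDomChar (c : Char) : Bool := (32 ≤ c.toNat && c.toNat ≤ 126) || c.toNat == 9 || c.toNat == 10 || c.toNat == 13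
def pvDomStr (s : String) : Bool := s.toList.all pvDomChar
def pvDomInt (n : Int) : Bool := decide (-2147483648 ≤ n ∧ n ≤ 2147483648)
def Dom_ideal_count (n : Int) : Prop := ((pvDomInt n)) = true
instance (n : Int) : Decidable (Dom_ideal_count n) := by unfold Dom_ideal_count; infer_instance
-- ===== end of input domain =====

-- B replaces A's full 1..n divisibility scan by the sqrt(n) divisor-pair walk: asymptotically faster.

-- ===== PORT A =====
def ideal_count (n : Int) : Int :=
  if n < 0 then 0
  else if n = 0 then 1
  else
    (PySem.List.pyRange 1 (n + 1) 1).foldl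
      (fun total d =>
        if PySem.Int.mod n d = 0 then
          if PySem.Int.mod d 2 = 0 then total + 0
          else if PySem.Int.mod d 4 = 1 then total + 1
          else total - 1
        else total) 0

-- ===== PORT B =====
def pvChi4 (d : Int) : Int :=
  if PySem.Int.mod d 2 = 0 then 0
  else if PySem.Int.mod d 4 = 1 then 1 else -1

-- the 'while d * d <= n' loop of Source B
def pvLoop (n d total : Int) : Int :=
  if d * d ≤ n then
    let total' :=
      if PySem.Int.mod n d = 0 then
        let t1 := total + pvChi4 d
        let q := PySem.Int.floordiv n d
        if q ≠ d then t1 + pvChi4 q else t1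
      else total
    pvLoop n (d + 1) total'
  else total
termination_by (n + 1 - d).toNat
decreasing_by
  have hdn : d ≤ n := by
    have h0 := Int.le_self_sq d
    nlinarith [h0]
  omega

def ideal_count_alt (n : Int) : Int :=
  if n < 0 then 0
  else if n = 0 then 1
  else pvLoop n 1 0

-- ===== PRECONDITION & SPEC =====
def Spec_ideal_count (n : Int) (out : Int) : Prop := out = ideal_count_alt n
instance (n : Int) (out : Int) : Decidable (Spec_ideal_count n out) := by unfold Spec_ideal_count; infer_instance

-- ===== CLAIM (what is proved, stated in full; the proofs are below) =====
def Claim_equal_ideal_count : Prop := ∀ (n : Int), Dom_ideal_count n → Spec_ideal_count n (ideal_count n)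

-- ===== LEMMAS AND PROOFS =====

-- chi_4 of a natural number, as both ports compute it
def pvChiN (k : Nat) : Int := pvChi4 (k : Int)

-- A's loop body adds (if d ∣ n then chi_4 d else 0)
lemma bodyA_eq (n total d : Int) :
    (if PySem.Int.mod n d = 0 then
        if PySem.Int.mod d 2 = 0 then total + 0
        else if PySem.Int.mod d 4 = 1 then total + 1
        else total - 1
      else total)
    = total + (if PySem.Int.mod n d = 0 then pvChi4 d else 0) := by
  unfold pvChi4
  split_ifs <;> ring

-- A's fold over range(1, m+1) as a Finset sum
lemma foldA_sum (g : Int → Int) (m : Nat) (t : Int) :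
    (PySem.List.pyRange 1 ((m : Int) + 1) 1).foldl (fun a x => a + g x) t
      = t + ∑ d ∈ Finset.Icc 1 m, g (d : Int) := by
  induction m with
  | zero => simp [PySem.List.pyRange_one_eq_nil]
  | succ m ih =>
      have h1 : ((m + 1 : Nat) : Int) + 1 = ((m : Int) + 1) + 1 := by push_cast; ring
      rw [h1, PySem.List.pyRange_one_succ_right (by omega), List.foldl_append, ih]
      have h2 : Finset.Icc 1 (m + 1) = insert (m + 1) (Finset.Icc 1 m) := by
        exact Eq.symm (Finset.insert_Icc_right_eq_Icc_add_one (by omega))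
      rw [h2, Finset.sum_insert (by simp)]
      simp only [List.foldl_cons, List.foldl_nil]
      push_cast
      ring

-- per-divisor contribution of B's loop
def pvH (m k : Nat) : Int :=
  if k ∣ m then pvChiN k + (if m / k ≠ k then pvChiN (m / k) else 0) else 0

lemma loopB_body (m d : Nat) (t : Int) :
    (if PySem.Int.mod (m : Int) (d : Int) = 0 then
        if PySem.Int.floordiv (m : Int) (d : Int) ≠ (d : Int) then
          t + pvChi4 (d : Int) + pvChi4 (PySem.Int.floordiv (m : Int) (d : Int))
        else t + pvChi4 (d : Int)
      else t) = t + pvH m d := by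
  rw [PySem.Int.mod_natCast, PySem.Int.floordiv_natCast]
  unfold pvH
  by_cases hdvd : d ∣ m
  · rw [Nat.dvd_iff_mod_eq_zero.mp hdvd]
    rw [if_pos (by norm_num), if_pos hdvd]
    by_cases hq : m / d = d
    · have hq' : ¬ (((m / d : Nat) : Int) ≠ (d : Int)) := by
        exact not_not_intro (by exact_mod_cast hq)
      rw [if_neg hq', if_neg (not_not_intro hq)]
      unfold pvChiN
      ring
    · have hq' : ((m / d : Nat) : Int) ≠ (d : Int) := by exact_mod_cast hq
      rw [if_pos hq', if_pos hq]
      unfold pvChiN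
      ring
  · have h0 : m % d ≠ 0 := fun h => hdvd (Nat.dvd_iff_mod_eq_zero.mpr h)
    have h0' : ((m % d : Nat) : Int) ≠ 0 := by exact_mod_cast h0
    rw [if_neg h0', if_neg hdvd, add_zero]

lemma loopB_sum (m : Nat) (d : Nat) (hd : 1 ≤ d) (t : Int) :
    pvLoop (m : Int) (d : Int) t = t + ∑ k ∈ Finset.Icc d (Nat.sqrt m), pvH m k := by
  by_cases hds : d ≤ Nat.sqrt m
  · rw [pvLoop]
    have hle : (d : Int) * d ≤ (m : Int) := by exact_mod_cast Nat.le_sqrt.mp hds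
    rw [if_pos hle]
    show pvLoop (m : Int) ((d : Int) + 1)
        (if PySem.Int.mod (m : Int) (d : Int) = 0 then
          if PySem.Int.floordiv (m : Int) (d : Int) ≠ (d : Int) then
            t + pvChi4 (d : Int) + pvChi4 (PySem.Int.floordiv (m : Int) (d : Int))
          else t + pvChi4 (d : Int)
        else t) = t + ∑ k ∈ Finset.Icc d (Nat.sqrt m), pvH m k
    have hcast : ((d : Int) + 1) = ((d + 1 : Nat) : Int) := by push_cast; ring
    rw [loopB_body, hcast, loopB_sum m (d + 1) (by omega)]
    have hsplit : Finset.Icc d (Nat.sqrt m) = insert d (Finset.Icc (d + 1) (Nat.sqrt m)) := by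
      ext x; simp only [Finset.mem_Icc, Finset.mem_insert]; omega
    rw [hsplit, Finset.sum_insert (by simp [Finset.mem_Icc])]
    ring
  · rw [pvLoop]
    have hgt : ¬ ((d : Int) * d ≤ (m : Int)) := by
      intro h
      exact hds (Nat.le_sqrt.mpr (by exact_mod_cast h))
    rw [if_neg hgt, Finset.Icc_eq_empty (by omega), Finset.sum_empty, add_zero]
termination_by (Nat.sqrt m + 1 - d)
decreasing_by omega

-- small divisors below sqrt, large divisors above
lemma pair_low (m e : Nat) (hm : 1 ≤ m) (he : e ∣ m) (hes : ¬ e ≤ Nat.sqrt m) :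
    m / e ≤ Nat.sqrt m := by
  have he0 : 0 < e := Nat.pos_of_dvd_of_pos he (by omega)
  have h1 : m / e < Nat.sqrt m + 1 := by
    rw [Nat.div_lt_iff_lt_mul he0]
    calc m < (Nat.sqrt m + 1) * (Nat.sqrt m + 1) := Nat.lt_succ_sqrt m
    _ ≤ (Nat.sqrt m + 1) * e := Nat.mul_le_mul_left _ (by omega)
  omega

lemma pair_high (m k : Nat) (hm : 1 ≤ m) (hk : k ∣ m) (hks : k ≤ Nat.sqrt m)
    (hne : m / k ≠ k) : ¬ (m / k ≤ Nat.sqrt m) := by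
  intro hle2
  have hk1 : 0 < k := Nat.pos_of_dvd_of_pos hk (by omega)
  have hs0 : 0 < Nat.sqrt m := Nat.sqrt_pos.mpr (by omega)
  have hprod : k * (m / k) = m := Nat.mul_div_cancel' hk
  have hss : Nat.sqrt m * Nat.sqrt m ≤ m := Nat.sqrt_le m
  have h1 : Nat.sqrt m * Nat.sqrt m ≤ k * Nat.sqrt m := by
    calc Nat.sqrt m * Nat.sqrt m ≤ m := hss
    _ = k * (m / k) := hprod.symm
    _ ≤ k * Nat.sqrt m := Nat.mul_le_mul_left _ hle2
  have hsk : Nat.sqrt m ≤ k := Nat.le_of_mul_le_mul_right h1 hs0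
  have h2 : Nat.sqrt m * Nat.sqrt m ≤ (m / k) * Nat.sqrt m := by
    calc Nat.sqrt m * Nat.sqrt m ≤ m := hss
    _ = k * (m / k) := hprod.symm
    _ = (m / k) * k := Nat.mul_comm _ _
    _ ≤ (m / k) * Nat.sqrt m := Nat.mul_le_mul_left _ hks
  have hsq : Nat.sqrt m ≤ m / k := Nat.le_of_mul_le_mul_right h2 hs0
  exact hne (by omega)

-- the divisor-pair identity
lemma pair_sum (m : Nat) (hm : 1 ≤ m) :
    ∑ k ∈ Finset.Icc 1 (Nat.sqrt m), pvH m k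
      = ∑ d ∈ m.divisors, pvChiN d := by
  have hfilter : (Finset.Icc 1 (Nat.sqrt m)).filter (· ∣ m)
      = m.divisors.filter (· ≤ Nat.sqrt m) := by
    ext x
    simp only [Finset.mem_filter, Finset.mem_Icc, Nat.mem_divisors]
    constructor
    · rintro ⟨⟨h1, h2⟩, h3⟩; exact ⟨⟨h3, by omega⟩, h2⟩
    · rintro ⟨⟨h3, _⟩, h2⟩
      exact ⟨⟨Nat.pos_of_dvd_of_pos h3 (by omega), h2⟩, h3⟩
  have e1 : ∑ k ∈ Finset.Icc 1 (Nat.sqrt m), pvH m k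
      = ∑ k ∈ (Finset.Icc 1 (Nat.sqrt m)).filter (· ∣ m),
          (pvChiN k + if m / k ≠ k then pvChiN (m / k) else 0) := by
    rw [Finset.sum_filter]
    exact Finset.sum_congr rfl fun k _ => rfl
  rw [e1, hfilter, Finset.sum_add_distrib]
  have e2 : ∑ x ∈ m.divisors.filter (· ≤ Nat.sqrt m), (if m / x ≠ x then pvChiN (m / x) else 0)
      = ∑ x ∈ (m.divisors.filter (· ≤ Nat.sqrt m)).filter (fun x => m / x ≠ x), pvChiN (m / x) :=
    (Finset.sum_filter _ _).symm
  have e3 : ∑ x ∈ (m.divisors.filter (· ≤ Nat.sqrt m)).filter (fun x => m / x ≠ x), pvChiN (m / x)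
      = ∑ x ∈ m.divisors.filter (fun x => ¬ x ≤ Nat.sqrt m), pvChiN x := by
    apply Finset.sum_nbij' (i := fun k => m / k) (j := fun e => m / e)
    · intro k hk
      simp only [Finset.mem_filter, Nat.mem_divisors] at hk ⊢
      exact ⟨⟨Nat.div_dvd_of_dvd hk.1.1.1, hk.1.1.2⟩,
        pair_high m k hm hk.1.1.1 hk.1.2 hk.2⟩
    · intro e he
      simp only [Finset.mem_filter, Nat.mem_divisors] at he ⊢
      have hdd : m / (m / e) = e := Nat.div_div_self he.1.1 he.1.2
      refine ⟨⟨⟨Nat.div_dvd_of_dvd he.1.1, he.1.2⟩, pair_low m e hm he.1.1 he.2⟩, ?_⟩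
      rw [hdd]
      intro hcontra
      exact he.2 (hcontra ▸ pair_low m e hm he.1.1 he.2)
    · intro k hk
      simp only [Finset.mem_filter, Nat.mem_divisors] at hk
      exact Nat.div_div_self hk.1.1.1 hk.1.1.2
    · intro e he
      simp only [Finset.mem_filter, Nat.mem_divisors] at he
      exact Nat.div_div_self he.1.1 he.1.2
    · intro k _
      rfl
  rw [e2, e3, Finset.sum_filter_add_sum_filter_not]

lemma A_sum (m : Nat) (hm : 1 ≤ m) :
    ∑ d ∈ Finset.Icc 1 m, (if PySem.Int.mod (m : Int) (d : Int) = 0 then pvChi4 (d : Int) else 0)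
      = ∑ d ∈ m.divisors, pvChiN d := by
  have hdiv : m.divisors = (Finset.Icc 1 m).filter (· ∣ m) := by
    ext x
    simp only [Finset.mem_filter, Finset.mem_Icc, Nat.mem_divisors]
    constructor
    · rintro ⟨h1, h2⟩
      exact ⟨⟨Nat.pos_of_dvd_of_pos h1 (by omega), Nat.le_of_dvd (by omega) h1⟩, h1⟩
    · rintro ⟨_, h1⟩; exact ⟨h1, by omega⟩
  rw [hdiv, Finset.sum_filter]
  apply Finset.sum_congr rfl
  intro d hd
  rw [PySem.Int.mod_natCast]
  by_cases h : d ∣ m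
  · rw [Nat.dvd_iff_mod_eq_zero.mp h, if_pos (by norm_num), if_pos h]
    rfl
  · have h2 : m % d ≠ 0 := fun hh => h (Nat.dvd_iff_mod_eq_zero.mpr hh)
    have h2' : ((m % d : Nat) : Int) ≠ 0 := by exact_mod_cast h2
    rw [if_neg h2', if_neg h]

-- ===== VERDICT (by name: the statement is the Claim_ definition above) =====
theorem ideal_count_spec : Claim_equal_ideal_count := by
  intro n _
  unfold Spec_ideal_count ideal_count ideal_count_alt
  by_cases h1 : n < 0
  · simp [h1]
  by_cases h2 : n = 0
  · simp [h2]
  rw [if_neg h1, if_neg h2, if_neg h1, if_neg h2]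
  obtain ⟨m, rfl⟩ : ∃ m : Nat, n = (m : Int) := ⟨n.toNat, by omega⟩
  have hm : 1 ≤ m := by omega
  have := foldA_sum (fun d => if PySem.Int.mod (m : Int) d = 0 then pvChi4 d else 0) m 0
  simp only [bodyA_eq] at *
  rw [this, A_sum m hm]
  have hl := loopB_sum m 1 le_rfl 0
  rw [show ((1:Nat):Int) = (1:Int) by norm_num] at hl
  rw [hl, pair_sum m hm]
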